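-- pv_equiv track=rewrite | github.com/apelevin/daai | src/glossary.py | _find_any
-- ===== SOURCE A (Python) =====
-- def _find_any(text: str, patterns: list[str]) -> bool:
--     if not text:
--         return False
--     low = text.lower()
--     for p in patterns:
--         if not p:
--             continue
--         if p.lower() in low:
--             return True
--     return False
-- ===== SOURCE B (Python) =====
-- def _find_any(text: str, patterns: list[str]) -> bool:
--     low = text.lower()
--     pats = [p.lower() for p in patterns if p]
--     for i in range(len(low)):
--         for p in pats:
--             if low.startswith(p, i):
--                 return True
--     return False
-- ===== Notes on version B (the rewrite author's own statement) =====
-- stated objective: alternative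
-- what changed: Pattern-major loop with a per-pattern 'in' search replaced by a position-major scan: patterns are lowered and filtered once, then each text position is tested with startswith against every pattern.
import Mathlib
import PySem

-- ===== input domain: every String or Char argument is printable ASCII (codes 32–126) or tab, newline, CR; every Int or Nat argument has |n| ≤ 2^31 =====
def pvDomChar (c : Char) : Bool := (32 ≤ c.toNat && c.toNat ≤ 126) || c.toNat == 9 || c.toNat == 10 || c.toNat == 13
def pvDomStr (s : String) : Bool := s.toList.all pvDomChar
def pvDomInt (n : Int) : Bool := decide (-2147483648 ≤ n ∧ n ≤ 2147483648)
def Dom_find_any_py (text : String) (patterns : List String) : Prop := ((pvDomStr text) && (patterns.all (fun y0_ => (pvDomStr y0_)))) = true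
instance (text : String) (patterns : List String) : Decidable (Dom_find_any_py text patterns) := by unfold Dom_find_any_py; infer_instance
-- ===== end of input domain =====

-- B replaces A's pattern-major loop ('p.lower() in low' per pattern) by a one-time
-- lower+filter of the patterns followed by a position-major startswith scan of the text
-- (objective: alternative algorithm of similar cost).


-- ===== PORT A =====
-- the 'for p in patterns' loop of A (with its 'continue' on empty p and early return)
def findAnyLoopA (low : String) : List String → Bool
  | [] => false
  | p :: rest =>
      if p = "" then findAnyLoopA low rest
      else if PySem.Str.isIn (PySem.Str.lower p) low then true
      else findAnyLoopA low rest

def find_any_py (text : String) (patterns : List String) : Bool :=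
  if text = "" then false
  else findAnyLoopA (PySem.Str.lower text) patterns

-- ===== PORT B =====
-- low.startswith(p, i) for 0 ≤ i ≤ len(low): exact as prefix test on the drop-i suffix
def find_any_py_alt (text : String) (patterns : List String) : Bool :=
  let low := PySem.Str.lower text
  let pats := (patterns.filter (fun p => p ≠ "")).map PySem.Str.lower
  (List.range low.toList.length).any (fun i =>
    pats.any (fun p => PySem.Chars.startswith (low.toList.drop i) p.toList))

-- ===== PRECONDITION & SPEC =====
def Spec_find_any_py (text : String) (patterns : List String) (out : Bool) : Prop := out = find_any_py_alt text patterns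
instance (text : String) (patterns : List String) (out : Bool) : Decidable (Spec_find_any_py text patterns out) := by unfold Spec_find_any_py; infer_instance

-- ===== CLAIM (what is proved, stated in full; the proofs are below) =====
def Claim_equal_find_any_py : Prop := ∀ (text : String) (patterns : List String), Dom_find_any_py text patterns → Spec_find_any_py text patterns (find_any_py text patterns)

-- ===== LEMMAS AND PROOFS =====

-- A's loop returns true iff some nonempty pattern's lowering is a substring of low
theorem findAnyLoopA_iff (low : String) (ps : List String) :
    findAnyLoopA low ps = true ↔
      ∃ p ∈ ps, ¬ p = "" ∧ PySem.Chars.lower p.toList <:+: low.toList := by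
  induction ps with
  | nil => simp [findAnyLoopA]
  | cons p rest ih =>
      rw [findAnyLoopA]
      by_cases hp : p = ""
      · rw [if_pos hp, ih]
        constructor
        · rintro ⟨q, hq, h⟩; exact ⟨q, List.mem_cons_of_mem _ hq, h⟩
        · rintro ⟨q, hq, h⟩
          rcases List.mem_cons.mp hq with rfl | hq
          · exact absurd hp h.1
          · exact ⟨q, hq, h⟩
      · rw [if_neg hp]
        by_cases hin : PySem.Str.isIn (PySem.Str.lower p) low = true
        · rw [if_pos hin]
          have hinf := (PySem.Str.isIn_iff_infix _ _).mp hin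
          rw [PySem.Str.toList_lower] at hinf
          exact iff_of_true rfl ⟨p, List.mem_cons_self, hp, hinf⟩
        · rw [if_neg hin, ih]
          constructor
          · rintro ⟨q, hq, h⟩; exact ⟨q, List.mem_cons_of_mem _ hq, h⟩
          · rintro ⟨q, hq, h⟩
            rcases List.mem_cons.mp hq with rfl | hq
            · exact absurd ((PySem.Str.isIn_iff_infix _ _).mpr
                (by rw [PySem.Str.toList_lower]; exact h.2)) hin
            · exact ⟨q, hq, h⟩

-- a nonempty list is an infix iff it is a prefix of some proper drop
theorem infix_iff_prefix_drop {α : Type} (p l : List α) (hp : p ≠ []) :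
    p <:+: l ↔ ∃ i < l.length, p <+: l.drop i := by
  constructor
  · rintro ⟨s, t, rfl⟩
    refine ⟨s.length, ?_, ?_⟩
    · have : p.length ≥ 1 := List.length_pos_iff.mpr hp
      simp; omega
    · simp [List.drop_left' rfl]
  · rintro ⟨i, _, hpre⟩
    exact hpre.isInfix.trans (List.drop_suffix i l).isInfix

theorem lower_ne_nil (p : String) (hp : ¬ p = "") : PySem.Chars.lower p.toList ≠ [] := by
  simpa [PySem.Chars.lower, String.toList_eq_nil_iff] using hp

-- B returns true iff some nonempty pattern's lowering is a substring of the lowered text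
theorem find_any_py_alt_iff (text : String) (patterns : List String) :
    find_any_py_alt text patterns = true ↔
      ∃ p ∈ patterns, ¬ p = "" ∧
        PySem.Chars.lower p.toList <:+: PySem.Chars.lower text.toList := by
  unfold find_any_py_alt
  simp only [List.any_eq_true, List.mem_range, List.mem_map, List.mem_filter,
    PySem.Chars.startswith_iff, PySem.Str.toList_lower, decide_eq_true_eq]
  constructor
  · rintro ⟨i, hi, q, ⟨p, ⟨hp, hne⟩, rfl⟩, hpre⟩
    rw [PySem.Str.toList_lower] at hpre
    exact ⟨p, hp, hne,
      (infix_iff_prefix_drop _ _ (lower_ne_nil p hne)).mpr ⟨i, by simpa using hi, hpre⟩⟩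
  · rintro ⟨p, hp, hne, hinf⟩
    obtain ⟨i, hi, hpre⟩ := (infix_iff_prefix_drop _ _ (lower_ne_nil p hne)).mp hinf
    exact ⟨i, by simpa using hi, PySem.Str.lower p, ⟨p, ⟨hp, hne⟩, rfl⟩,
      by rw [PySem.Str.toList_lower]; exact hpre⟩

theorem find_any_py_iff (text : String) (patterns : List String) :
    find_any_py text patterns = true ↔
      ∃ p ∈ patterns, ¬ p = "" ∧
        PySem.Chars.lower p.toList <:+: PySem.Chars.lower text.toList := by
  unfold find_any_py
  by_cases ht : text = ""
  · rw [if_pos ht]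
    constructor
    · intro h; exact absurd h (by simp)
    · rintro ⟨p, hp, hne, hinf⟩
      rw [ht] at hinf
      simp only [show ("" : String).toList = [] from rfl, PySem.Chars.lower,
        List.map_nil] at hinf
      exact absurd (List.eq_nil_of_infix_nil hinf) (lower_ne_nil p hne)
  · rw [if_neg ht, findAnyLoopA_iff]
    simp only [PySem.Str.toList_lower]

-- ===== VERDICT (by name: the statement is the Claim_ definition above) =====
theorem find_any_py_spec : Claim_equal_find_any_py := by
  intro text patterns _
  unfold Spec_find_any_py
  rw [Bool.eq_iff_iff, find_any_py_iff, find_any_py_alt_iff]
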